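-- pv_equiv track=rewrite | github.com/Egraf99/Running_line | symbols.py | from_third_to_up_and_center
-- ===== SOURCE A (Python) =====
-- def from_third_to_up_and_center(pix_column: list, height: int, symbol_id, order_col) -> list:
--     if order_col <= (height // 3):
--         for h in range(height):
--             if h <= height // 2 and height - order_col >= height // 4 and order_col < height // 2 * 2:
--                 if h == ((height // 3) - order_col):
--                     pix_column.append(symbol_id[0])
--                 elif h == ((height // 3) + order_col - 1):
--                     pix_column.append(symbol_id[1])
--                 else:
--                     pix_column.append(0)
--             else:
--                 pix_column.append(0)
--         return pix_column
-- ===== SOURCE B (Python) =====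
-- def from_third_to_up_and_center(pix_column: list, height: int, symbol_id, order_col) -> list:
--     if order_col > height // 3:
--         return None
--     col = [0] * max(height, 0)
--     if height - order_col >= height // 4 and order_col < height // 2 * 2:
--         half = height // 2
--         p0 = height // 3 - order_col
--         if 0 <= p0 < height and p0 <= half:
--             col[p0] = symbol_id[0]
--         p1 = height // 3 + order_col - 1
--         if 0 <= p1 < height and p1 <= half:
--             col[p1] = symbol_id[1]
--     pix_column.extend(col)
--     return pix_column
-- ===== Notes on version B (the rewrite author's own statement) =====
-- stated objective: simpler
-- what changed: Instead of scanning every row and re-testing the two symbol equations per row, B computes the two symbol positions in closed form, builds a zero column, writes the two symbols directly, and extends pix_column once; the per-row loop disappears.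
import Mathlib
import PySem

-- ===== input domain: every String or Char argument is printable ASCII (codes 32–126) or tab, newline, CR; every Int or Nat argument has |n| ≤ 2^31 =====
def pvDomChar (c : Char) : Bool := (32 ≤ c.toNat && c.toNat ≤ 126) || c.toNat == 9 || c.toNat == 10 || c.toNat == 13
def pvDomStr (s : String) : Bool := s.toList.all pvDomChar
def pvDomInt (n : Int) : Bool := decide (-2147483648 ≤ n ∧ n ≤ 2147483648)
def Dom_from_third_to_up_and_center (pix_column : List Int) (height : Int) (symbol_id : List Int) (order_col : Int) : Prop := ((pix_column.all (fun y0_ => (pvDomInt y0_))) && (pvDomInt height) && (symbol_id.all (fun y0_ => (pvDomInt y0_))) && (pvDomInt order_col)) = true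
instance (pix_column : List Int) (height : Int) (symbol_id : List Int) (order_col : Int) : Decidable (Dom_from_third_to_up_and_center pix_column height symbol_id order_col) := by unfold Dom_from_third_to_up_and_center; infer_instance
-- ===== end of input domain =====

-- B replaces A's per-row scan (re-testing the two symbol equations at every row) by computing the
-- two symbol positions in closed form, building a zero column, writing the two symbols directly,
-- and extending pix_column once (objective: simpler). Both A and B mutate pix_column in place by
-- appending the new column; the equivalence proved here, per convention, is about the return value.


-- ===== PORT A =====
-- Literal transliteration of A: for h in range(height), append per-row; symbol_id[0]/[1] via
-- pyGet? (none = IndexError, excluded by Pre_); the implicit-None branch (order_col > height//3)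
-- is outside Pre_ and ported as [].
def from_third_to_up_and_center (pix_column : List Int) (height : Int) (symbol_id : List Int) (order_col : Int) : List Int :=
  if order_col ≤ PySem.Int.floordiv height 3 then
    (PySem.List.pyRange 0 height 1).foldl (fun acc h =>
      if h ≤ PySem.Int.floordiv height 2 ∧ height - order_col ≥ PySem.Int.floordiv height 4 ∧
          order_col < PySem.Int.floordiv height 2 * 2 then
        if h = PySem.Int.floordiv height 3 - order_col then
          acc ++ [(PySem.List.pyGet? symbol_id 0).getD 0]
        else if h = PySem.Int.floordiv height 3 + order_col - 1 then
          acc ++ [(PySem.List.pyGet? symbol_id 1).getD 0]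
        else acc ++ [0]
      else acc ++ [0]) pix_column
  else []

-- ===== PORT B =====
-- Literal transliteration of Source B: [0]*max(height,0), two guarded single-index writes (pySetD),
-- then pix_column.extend(col); the None branch is outside Pre_ and ported as [].
def from_third_to_up_and_center_alt (pix_column : List Int) (height : Int) (symbol_id : List Int) (order_col : Int) : List Int :=
  if PySem.Int.floordiv height 3 < order_col then []
  else
    let col0 := List.replicate height.toNat (0 : Int)
    let col :=
      if height - order_col ≥ PySem.Int.floordiv height 4 ∧
          order_col < PySem.Int.floordiv height 2 * 2 then
        let half := PySem.Int.floordiv height 2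
        let p0 := PySem.Int.floordiv height 3 - order_col
        let c0 := if 0 ≤ p0 ∧ p0 < height ∧ p0 ≤ half then
            PySem.List.pySetD col0 p0 ((PySem.List.pyGet? symbol_id 0).getD 0)
          else col0
        let p1 := PySem.Int.floordiv height 3 + order_col - 1
        if 0 ≤ p1 ∧ p1 < height ∧ p1 ≤ half then
          PySem.List.pySetD c0 p1 ((PySem.List.pyGet? symbol_id 1).getD 0)
        else c0
      else col0
    pix_column ++ col

-- ===== PRECONDITION & SPEC =====
-- Pre_ excludes exactly the inputs where Python A does not return a list: order_col > height//3
-- (A falls through and returns None, not a list), and the inputs where the loop reaches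
-- symbol_id[0] or symbol_id[1] with symbol_id too short (IndexError).
def Pre_from_third_to_up_and_center (pix_column : List Int) (height : Int) (symbol_id : List Int) (order_col : Int) : Prop :=
  order_col ≤ PySem.Int.floordiv height 3 ∧
  ((height - order_col ≥ PySem.Int.floordiv height 4 ∧
      order_col < PySem.Int.floordiv height 2 * 2) →
    ((0 ≤ PySem.Int.floordiv height 3 - order_col ∧
        PySem.Int.floordiv height 3 - order_col < height ∧
        PySem.Int.floordiv height 3 - order_col ≤ PySem.Int.floordiv height 2) →
      1 ≤ symbol_id.length) ∧
    ((0 ≤ PySem.Int.floordiv height 3 + order_col - 1 ∧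
        PySem.Int.floordiv height 3 + order_col - 1 < height ∧
        PySem.Int.floordiv height 3 + order_col - 1 ≤ PySem.Int.floordiv height 2) →
      2 ≤ symbol_id.length))
instance (pix_column : List Int) (height : Int) (symbol_id : List Int) (order_col : Int) : Decidable (Pre_from_third_to_up_and_center pix_column height symbol_id order_col) := by unfold Pre_from_third_to_up_and_center; infer_instance

def pvWitness_from_third_to_up_and_center : List Int × Int × List Int × Int := ([], 6, [7, 9], 1)

def Spec_from_third_to_up_and_center (pix_column : List Int) (height : Int) (symbol_id : List Int) (order_col : Int) (out : List Int) : Prop := out = from_third_to_up_and_center_alt pix_column height symbol_id order_col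
instance (pix_column : List Int) (height : Int) (symbol_id : List Int) (order_col : Int) (out : List Int) : Decidable (Spec_from_third_to_up_and_center pix_column height symbol_id order_col out) := by unfold Spec_from_third_to_up_and_center; infer_instance

-- ===== CLAIM (what is proved, stated in full; the proofs are below) =====
def Claim_equal_from_third_to_up_and_center : Prop := ∀ (pix_column : List Int) (height : Int) (symbol_id : List Int) (order_col : Int), Dom_from_third_to_up_and_center pix_column height symbol_id order_col → Pre_from_third_to_up_and_center pix_column height symbol_id order_col → Spec_from_third_to_up_and_center pix_column height symbol_id order_col (from_third_to_up_and_center pix_column height symbol_id order_col)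

-- ===== LEMMAS AND PROOFS =====

-- The per-row value A appends at row h, with the three floor divisions and the two symbol
-- values abstracted; the core lemma below relates A's row map to B's zero-column-with-writes.
def pvRowVal (t2 t3 t4 height order_col s0 s1 : Int) (h : Int) : Int :=
  if h ≤ t2 ∧ height - order_col ≥ t4 ∧ order_col < t2 * 2 then
    if h = t3 - order_col then s0
    else if h = t3 + order_col - 1 then s1
    else 0
  else 0

theorem pvColumn_eq (t2 t3 t4 height order_col s0 s1 : Int) :
    (PySem.List.pyRange 0 height 1).map (pvRowVal t2 t3 t4 height order_col s0 s1) =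
    (let col0 := List.replicate height.toNat (0 : Int)
     if height - order_col ≥ t4 ∧ order_col < t2 * 2 then
       let c0 := if 0 ≤ t3 - order_col ∧ t3 - order_col < height ∧ t3 - order_col ≤ t2 then
           PySem.List.pySetD col0 (t3 - order_col) s0
         else col0
       if 0 ≤ t3 + order_col - 1 ∧ t3 + order_col - 1 < height ∧ t3 + order_col - 1 ≤ t2 then
         PySem.List.pySetD c0 (t3 + order_col - 1) s1
       else c0
     else col0) := by
  apply List.ext_getElem
  · simp only [List.length_map, PySem.List.length_pyRange_one]
    split_ifs <;> simp [PySem.List.length_pySetD]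
  · intro i hi hi2
    simp only [List.length_map, PySem.List.length_pyRange_one] at hi
    rw [List.getElem_map, PySem.List.getElem_pyRange_one]
    have hiInt : (0 : Int) ≤ (i : Int) ∧ (i : Int) < height := by
      constructor
      · exact Int.natCast_nonneg i
      · omega
    simp only [pvRowVal, zero_add]
    by_cases hG : height - order_col ≥ t4 ∧ order_col < t2 * 2
    · simp only [if_pos hG]
      by_cases h0 : 0 ≤ t3 - order_col ∧ t3 - order_col < height ∧ t3 - order_col ≤ t2
      · by_cases h1 : 0 ≤ t3 + order_col - 1 ∧ t3 + order_col - 1 < height ∧ t3 + order_col - 1 ≤ t2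
        · simp only [if_pos h0, if_pos h1,
            PySem.List.pySetD_of_nonneg _ _ h1.1, PySem.List.pySetD_of_nonneg _ _ h0.1,
            List.getElem_set, List.getElem_replicate]
          split_ifs <;> omega
        · simp only [if_pos h0, if_neg h1,
            PySem.List.pySetD_of_nonneg _ _ h0.1, List.getElem_set, List.getElem_replicate]
          split_ifs <;> omega
      · by_cases h1 : 0 ≤ t3 + order_col - 1 ∧ t3 + order_col - 1 < height ∧ t3 + order_col - 1 ≤ t2
        · simp only [if_neg h0, if_pos h1,
            PySem.List.pySetD_of_nonneg _ _ h1.1, List.getElem_set, List.getElem_replicate]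
          split_ifs <;> omega
        · simp only [if_neg h0, if_neg h1, List.getElem_replicate]
          split_ifs <;> omega
    · simp only [if_neg hG, List.getElem_replicate]
      split_ifs with hc h1 h2 <;> first | rfl | exact absurd ⟨hc.2.1, hc.2.2⟩ hG

-- ===== VERDICT (by name: the statement is the Claim_ definition above) =====
theorem from_third_to_up_and_center_spec : Claim_equal_from_third_to_up_and_center := by
  intro pix_column height symbol_id order_col _hDom hPre
  unfold Spec_from_third_to_up_and_center from_third_to_up_and_center from_third_to_up_and_center_alt
  rw [if_pos hPre.1, if_neg (not_lt.mpr hPre.1)]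
  have hbody :
      (fun (acc : List Int) (h : Int) =>
        if h ≤ PySem.Int.floordiv height 2 ∧ height - order_col ≥ PySem.Int.floordiv height 4 ∧
            order_col < PySem.Int.floordiv height 2 * 2 then
          if h = PySem.Int.floordiv height 3 - order_col then
            acc ++ [(PySem.List.pyGet? symbol_id 0).getD 0]
          else if h = PySem.Int.floordiv height 3 + order_col - 1 then
            acc ++ [(PySem.List.pyGet? symbol_id 1).getD 0]
          else acc ++ [0]
        else acc ++ [0]) =
      fun acc h => acc ++ [pvRowVal (PySem.Int.floordiv height 2) (PySem.Int.floordiv height 3)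
        (PySem.Int.floordiv height 4) height order_col
        ((PySem.List.pyGet? symbol_id 0).getD 0) ((PySem.List.pyGet? symbol_id 1).getD 0) h] := by
    funext acc h
    simp only [pvRowVal]
    split_ifs <;> rfl
  rw [hbody, PySem.List.foldl_append_singleton_eq_map,
    pvColumn_eq (PySem.Int.floordiv height 2) (PySem.Int.floordiv height 3)
      (PySem.Int.floordiv height 4) height order_col
      ((PySem.List.pyGet? symbol_id 0).getD 0) ((PySem.List.pyGet? symbol_id 1).getD 0)]
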